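-- pv_equiv track=rewrite | github.com/GuillaumeTroesch/DAG_CSR | scripts/ancienne_etude/fonctions_old.py | accumulationNoeud1
-- ===== SOURCE A (Python) =====
-- def accumulationNoeud1(temps, noeud, capaciteNoeud, flotAretesEntrantes):
-- 	nbAretesEntrantes = len(flotAretesEntrantes)
-- 	res = flotAretesEntrantes
-- 	flotNoeud=0
-- 	i=0
-- 	while (capaciteNoeud>flotNoeud and i<nbAretesEntrantes):
-- 		cur_flotAretesEntrante = flotAretesEntrantes[i]
-- 		if (capaciteNoeud>flotNoeud+cur_flotAretesEntrante):
-- 			res[i]=0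
-- 			flotNoeud+=cur_flotAretesEntrante
-- 		else:
-- 			res[i]=cur_flotAretesEntrante-(capaciteNoeud-flotNoeud)
-- 			flotNoeud=capaciteNoeud
-- 		i+=1
-- 	return (flotNoeud, res)
-- ===== SOURCE B (Python) =====
-- def accumulationNoeud1(temps, noeud, capaciteNoeud, flotAretesEntrantes):
--     # Two-phase re-implementation: compute prefix sums first, then locate the
--     # saturation point and rewrite the list with one slice assignment.
--     if capaciteNoeud <= 0:
--         return (0, flotAretesEntrantes)
--     cum = []
--     s = 0
--     for x in flotAretesEntrantes:
--         s += x
--         cum.append(s)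
--     for idx, c in enumerate(cum):
--         if c >= capaciteNoeud:
--             flotAretesEntrantes[:idx] = [0] * idx
--             flotAretesEntrantes[idx] = c - capaciteNoeud
--             return (capaciteNoeud, flotAretesEntrantes)
--     flotAretesEntrantes[:] = [0] * len(flotAretesEntrantes)
--     return (s, flotAretesEntrantes)
-- ===== Notes on version B (the rewrite author's own statement) =====
-- stated objective: alternative
-- what changed: Replaces A's single stateful while-loop (running flow + index, branch per element) by a two-phase decomposition: build the prefix-sum list, find the first index reaching capacity, then rewrite the list with slice assignments.
import Mathlib
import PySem

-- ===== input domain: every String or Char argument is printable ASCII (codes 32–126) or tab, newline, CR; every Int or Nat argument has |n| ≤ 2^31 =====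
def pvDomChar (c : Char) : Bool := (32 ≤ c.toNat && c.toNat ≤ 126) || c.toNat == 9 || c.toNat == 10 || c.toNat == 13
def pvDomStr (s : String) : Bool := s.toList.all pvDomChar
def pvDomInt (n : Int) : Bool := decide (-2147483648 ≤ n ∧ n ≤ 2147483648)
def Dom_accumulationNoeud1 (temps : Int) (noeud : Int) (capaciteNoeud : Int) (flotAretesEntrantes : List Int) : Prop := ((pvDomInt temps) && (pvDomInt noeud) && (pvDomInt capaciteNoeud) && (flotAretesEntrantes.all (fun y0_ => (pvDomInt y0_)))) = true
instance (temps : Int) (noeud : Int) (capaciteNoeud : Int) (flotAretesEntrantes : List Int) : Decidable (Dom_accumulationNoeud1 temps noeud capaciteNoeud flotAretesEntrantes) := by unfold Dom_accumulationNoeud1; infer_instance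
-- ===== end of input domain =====

-- B replaces A's single stateful while-loop by prefix sums + first-saturation search + slice rewrite
-- (alternative decomposition, same cost). Both Pythons mutate the argument list in place; the
-- equivalence proved here is about the RETURN value (which aliases that list in both programs).

-- ===== PORT A =====
-- A's while loop over index i, transcribed as structural recursion on the remaining
-- suffix `rest` with the already-rewritten prefix kept reversed in `acc`.
def pvLoopA (cap : Int) (flot : Int) (acc : List Int) (rest : List Int) : Int × List Int :=
  match rest with
  | [] => (flot, acc.reverse)
  | cur :: t =>
    if cap > flot then
      if cap > flot + cur then
        pvLoopA cap (flot + cur) (0 :: acc) t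
      else
        (cap, acc.reverse ++ (cur - (cap - flot)) :: t)
    else
      (flot, acc.reverse ++ cur :: t)

def accumulationNoeud1 (temps : Int) (noeud : Int) (capaciteNoeud : Int) (flotAretesEntrantes : List Int) : Int × List Int :=
  pvLoopA capaciteNoeud 0 [] flotAretesEntrantes

-- ===== PORT B =====
-- B's first pass: running prefix sums; returns the list `cum` and the final running total `s`.
def pvCumB (s : Int) : List Int → List Int × Int
  | [] => ([], s)
  | x :: t =>
    let r := pvCumB (s + x) t
    ((s + x) :: r.1, r.2)

-- B's second pass: `for idx, c in enumerate(cum): if c >= cap: …` — first index whose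
-- prefix sum reaches the capacity, with its value.
def pvFindB (cap : Int) (idx : Nat) : List Int → Option (Nat × Int)
  | [] => none
  | c :: t => if c ≥ cap then some (idx, c) else pvFindB cap (idx + 1) t

def accumulationNoeud1_alt (temps : Int) (noeud : Int) (capaciteNoeud : Int) (flotAretesEntrantes : List Int) : Int × List Int :=
  if capaciteNoeud ≤ 0 then (0, flotAretesEntrantes)
  else
    let r := pvCumB 0 flotAretesEntrantes
    match pvFindB capaciteNoeud 0 r.1 with
    | some (idx, c) =>
        (capaciteNoeud, List.replicate idx 0 ++ (c - capaciteNoeud) :: flotAretesEntrantes.drop (idx + 1))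
    | none => (r.2, List.replicate flotAretesEntrantes.length 0)

-- ===== PRECONDITION & SPEC =====
def Spec_accumulationNoeud1 (temps : Int) (noeud : Int) (capaciteNoeud : Int) (flotAretesEntrantes : List Int) (out : Int × List Int) : Prop := out = accumulationNoeud1_alt temps noeud capaciteNoeud flotAretesEntrantes
instance (temps : Int) (noeud : Int) (capaciteNoeud : Int) (flotAretesEntrantes : List Int) (out : Int × List Int) : Decidable (Spec_accumulationNoeud1 temps noeud capaciteNoeud flotAretesEntrantes out) := by unfold Spec_accumulationNoeud1; infer_instance

-- ===== CLAIM (what is proved, stated in full; the proofs are below) =====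
def Claim_equal_accumulationNoeud1 : Prop := ∀ (temps : Int) (noeud : Int) (capaciteNoeud : Int) (flotAretesEntrantes : List Int), Dom_accumulationNoeud1 temps noeud capaciteNoeud flotAretesEntrantes → Spec_accumulationNoeud1 temps noeud capaciteNoeud flotAretesEntrantes (accumulationNoeud1 temps noeud capaciteNoeud flotAretesEntrantes)

-- ===== LEMMAS AND PROOFS =====
-- Bridge between the two decompositions: a single recursive function capturing what
-- both programs compute on the suffix still to be processed.
def pvCombine (cap : Int) (flot : Int) : List Int → Int × List Int
  | [] => (flot, [])
  | x :: t =>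
    if cap ≤ flot + x then (cap, (flot + x - cap) :: t)
    else
      let r := pvCombine cap (flot + x) t
      (r.1, 0 :: r.2)

theorem pvLoopA_eq_combine (cap : Int) : ∀ (rest : List Int) (flot : Int) (acc : List Int),
    flot < cap →
    pvLoopA cap flot acc rest = ((pvCombine cap flot rest).1, acc.reverse ++ (pvCombine cap flot rest).2) := by
  intro rest
  induction rest with
  | nil => intro flot acc h; simp [pvLoopA, pvCombine]
  | cons x t ih =>
    intro flot acc h
    simp only [pvLoopA, pvCombine]
    by_cases hx : cap ≤ flot + x
    · have h1 : ¬ cap > flot + x := by omega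
      simp [h, h1, hx]
      omega
    · have h1 : cap > flot + x := by omega
      simp only [if_pos h, if_pos h1]
      rw [ih (flot + x) (0 :: acc) (by omega)]
      simp [if_neg hx]

theorem pvFindB_shift (cap : Int) : ∀ (l : List Int) (i : Nat),
    pvFindB cap i l = (pvFindB cap 0 l).map (fun p => (i + p.1, p.2)) := by
  intro l
  induction l with
  | nil => intro i; simp [pvFindB]
  | cons c t ih =>
    intro i
    by_cases hc : c ≥ cap
    · simp [pvFindB, hc]
    · simp only [pvFindB, if_neg hc]
      rw [ih (i + 1), ih 1]
      cases pvFindB cap 0 t with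
      | none => simp
      | some p => simp; omega

theorem pvB_eq_combine (cap : Int) : ∀ (l : List Int) (flot : Int),
    (match pvFindB cap 0 (pvCumB flot l).1 with
     | some (idx, c) => (cap, List.replicate idx 0 ++ (c - cap) :: l.drop (idx + 1))
     | none => ((pvCumB flot l).2, List.replicate l.length 0))
    = pvCombine cap flot l := by
  intro l
  induction l with
  | nil => intro flot; simp [pvCumB, pvFindB, pvCombine]
  | cons x t ih =>
    intro flot
    simp only [pvCumB, pvCombine]
    by_cases hx : cap ≤ flot + x
    · have : flot + x ≥ cap := by omega
      simp [pvFindB, this]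
    · have h1 : ¬ (flot + x ≥ cap) := by omega
      simp only [pvFindB, if_neg h1, if_neg hx]
      rw [pvFindB_shift cap _ 1]
      rw [← ih (flot + x)]
      cases hf : pvFindB cap 0 (pvCumB (flot + x) t).1 with
      | none => simp [List.replicate_succ]
      | some p =>
        simp only [hf, Option.map_some]
        cases p with
        | mk idx c => simp [Nat.add_comm 1 idx, List.replicate_succ]

-- ===== VERDICT (by name: the statement is the Claim_ definition above) =====
theorem accumulationNoeud1_spec : Claim_equal_accumulationNoeud1 := by
  intro temps noeud cap l _
  unfold Spec_accumulationNoeud1 accumulationNoeud1 accumulationNoeud1_alt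
  by_cases hcap : cap ≤ 0
  · have h1 : ¬ cap > (0 : Int) := by omega
    cases l with
    | nil => simp [pvLoopA, hcap]
    | cons x t => simp [pvLoopA, h1, hcap]
  · simp only [if_neg hcap]
    rw [pvLoopA_eq_combine cap l 0 [] (by omega)]
    rw [← pvB_eq_combine cap l 0]
    cases pvFindB cap 0 (pvCumB 0 l).1 with
    | none => simp
    | some p => cases p; simp
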